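-- pv_equiv track=rewrite | github.com/HermanoDaoista/Recuperatorio | recuperatorio_primer_parcial/funciones.py | recortar_matriz_por_filas
-- ===== SOURCE A (Python) =====
-- def recortar_matriz_por_filas(matriz:list[list], numero_filas:int)->list[list]:
--     """crea una nueva matriz con la cantidad de filas que indiquemos por parametro
--
--     Args:
--         matriz (list[list]): _description_
--         numero_filas (int): _description_
--
--     Returns:
--         list[list]: _description_
--     """
--     nueva_matriz = [None] * numero_filas
--
--     contador = 0
--
--     for fila in matriz:
--         if contador < numero_filas:  # Solo cargar las primeras 3 filas
--             nueva_matriz[contador] = fila  # Carga la fila en la posición `contador`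
--             contador += 1
--
--     return nueva_matriz
-- ===== SOURCE B (Python) =====
-- def recortar_matriz_por_filas(matriz: list[list], numero_filas: int) -> list[list]:
--     return matriz[:max(numero_filas, 0)]
-- ===== Notes on version B (the rewrite author's own statement) =====
-- stated objective: idiomatic
-- what changed: A preallocates a [None]*n buffer and fills it with a counter-guarded loop over the rows; B is a single clamped slice matriz[:max(n,0)] with no loop, no buffer and no counter.
-- outside the precondition, e.g. on recortar_matriz_por_filas([[1]], 2): A returns [[1], None], B returns [[1]]
import Mathlib
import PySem

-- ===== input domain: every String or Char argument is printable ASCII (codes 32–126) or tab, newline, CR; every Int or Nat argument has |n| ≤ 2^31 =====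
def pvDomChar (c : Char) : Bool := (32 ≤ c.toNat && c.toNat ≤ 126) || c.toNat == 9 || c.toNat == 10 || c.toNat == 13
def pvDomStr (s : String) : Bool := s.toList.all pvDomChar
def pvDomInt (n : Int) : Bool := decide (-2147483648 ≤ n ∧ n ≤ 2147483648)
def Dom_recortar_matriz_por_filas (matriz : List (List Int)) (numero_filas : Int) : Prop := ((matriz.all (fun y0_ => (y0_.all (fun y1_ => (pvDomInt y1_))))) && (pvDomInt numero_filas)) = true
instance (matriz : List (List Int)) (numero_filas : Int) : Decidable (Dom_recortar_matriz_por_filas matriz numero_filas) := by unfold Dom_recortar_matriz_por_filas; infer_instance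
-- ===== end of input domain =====

-- B replaces A's preallocated [None]*n buffer and counter-guarded loop by a single clamped slice (idiomatic).

-- ===== PORT A =====
-- A builds [None] * numero_filas (empty for negative n) and overwrites the first entries
-- with a counter-guarded pass over matriz.  The buffer is List (Option (List Int)); the
-- final .map (·.getD []) only extracts: under Pre_ no `none` remains.  Outside Pre_ A's
-- Python value contains None, which the return type List (List Int) cannot represent.
def recortar_matriz_por_filas (matriz : List (List Int)) (numero_filas : Int) : List (List Int) :=
  let nueva_matriz : List (Option (List Int)) := List.replicate numero_filas.toNat none
  let st := matriz.foldl
    (fun (st : List (Option (List Int)) × Int) fila =>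
      if st.2 < numero_filas then (PySem.List.pySetD st.1 st.2 (some fila), st.2 + 1) else st)
    (nueva_matriz, 0)
  st.1.map (fun o => o.getD [])

-- ===== PORT B =====
def recortar_matriz_por_filas_alt (matriz : List (List Int)) (numero_filas : Int) : List (List Int) :=
  PySem.List.slice matriz none (some (max numero_filas 0))

-- ===== PRECONDITION & SPEC =====
-- Pre_ excludes numero_filas > len(matriz): there A returns a list still containing None,
-- which is not a value of the declared type list[list] (and not representable as List (List Int)).
def Pre_recortar_matriz_por_filas (matriz : List (List Int)) (numero_filas : Int) : Prop :=
  numero_filas ≤ (matriz.length : Int)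
instance (matriz : List (List Int)) (numero_filas : Int) : Decidable (Pre_recortar_matriz_por_filas matriz numero_filas) := by unfold Pre_recortar_matriz_por_filas; infer_instance

def pvWitness_recortar_matriz_por_filas : List (List Int) × Int := ([[1, 2], [3, 4], [5]], 2)

def Spec_recortar_matriz_por_filas (matriz : List (List Int)) (numero_filas : Int) (out : List (List Int)) : Prop := out = recortar_matriz_por_filas_alt matriz numero_filas
instance (matriz : List (List Int)) (numero_filas : Int) (out : List (List Int)) : Decidable (Spec_recortar_matriz_por_filas matriz numero_filas out) := by unfold Spec_recortar_matriz_por_filas; infer_instance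

-- ===== CLAIM (what is proved, stated in full; the proofs are below) =====
def Claim_equal_recortar_matriz_por_filas : Prop := ∀ (matriz : List (List Int)) (numero_filas : Int), Dom_recortar_matriz_por_filas matriz numero_filas → Pre_recortar_matriz_por_filas matriz numero_filas → Spec_recortar_matriz_por_filas matriz numero_filas (recortar_matriz_por_filas matriz numero_filas)

-- ===== LEMMAS AND PROOFS =====

-- If the counter is already ≥ numero_filas, A's loop never fires.
theorem rmpf_fold_noop (n : Int) (m : List (List Int)) (buf : List (Option (List Int))) (c : Int)
    (h : n ≤ c) :
    m.foldl
      (fun (st : List (Option (List Int)) × Int) fila =>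
        if st.2 < n then (PySem.List.pySetD st.1 st.2 (some fila), st.2 + 1) else st)
      (buf, c) = (buf, c) := by
  induction m with
  | nil => rfl
  | cons fila rest ih =>
    simp only [List.foldl_cons, if_neg (by omega : ¬ c < n)]
    exact ih

-- Loop invariant: buffer = already-filled prefix (as `some`s) ++ k empty slots,
-- counter = prefix length, and numero_filas = prefix length + k.
theorem rmpf_fold_inv (m pre : List (List Int)) (k : Nat) :
    m.foldl
      (fun (st : List (Option (List Int)) × Int) fila =>
        if st.2 < ((pre.length + k : Nat) : Int) then
          (PySem.List.pySetD st.1 st.2 (some fila), st.2 + 1) else st)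
      (pre.map some ++ List.replicate k none, (pre.length : Int))
    = ((pre ++ m.take k).map some ++ List.replicate (k - m.length) none,
       ((min (pre.length + k) (pre.length + m.length) : Nat) : Int)) := by
  induction m generalizing pre k with
  | nil => simp
  | cons fila rest ih =>
    cases k with
    | zero =>
      simp only [List.foldl_cons, if_neg (by omega : ¬ ((pre.length : Int)) < ((pre.length + 0 : Nat) : Int))]
      have := ih pre 0
      simp only [Nat.add_zero] at this ⊢
      rw [this]
      simp only [List.take_zero, List.length_cons, Nat.zero_sub, Prod.mk.injEq, true_and]
      norm_cast
      omega
    | succ k' =>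
      simp only [List.foldl_cons,
        if_pos (by push_cast; omega : ((pre.length : Int)) < ((pre.length + (k' + 1) : Nat) : Int))]
      have hset : PySem.List.pySetD (pre.map some ++ List.replicate (k' + 1) (none : Option (List Int)))
          ((pre.length : Int)) (some fila)
          = (pre ++ [fila]).map some ++ List.replicate k' none := by
        rw [PySem.List.pySetD_natCast]
        rw [List.set_append_right _ _ (by simp)]
        simp [List.replicate_succ]
      have hlen : ((pre.length : Int)) + 1 = (((pre ++ [fila]).length : Nat) : Int) := by
        simp
      have harg : ((pre.length + (k' + 1) : Nat) : Int) = (((pre ++ [fila]).length + k' : Nat) : Int) := by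
        push_cast
        simp
        ring
      rw [hset, hlen, harg, ih (pre ++ [fila]) k']
      simp only [List.append_assoc, List.singleton_append, List.take_succ_cons,
        List.length_append, List.length_cons, List.length_nil, Prod.mk.injEq]
      refine ⟨by rw [show k' - rest.length = k' + 1 - (rest.length + 1) from by omega], ?_⟩
      norm_cast
      omega

-- ===== VERDICT (by name: the statement is the Claim_ definition above) =====
theorem recortar_matriz_por_filas_spec : Claim_equal_recortar_matriz_por_filas := by
  intro matriz numero_filas _hdom hpre
  unfold Spec_recortar_matriz_por_filas recortar_matriz_por_filas recortar_matriz_por_filas_alt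
  dsimp only
  by_cases hn : numero_filas ≤ 0
  · have h0 : numero_filas.toNat = 0 := by omega
    rw [rmpf_fold_noop numero_filas matriz _ 0 hn]
    rw [show max numero_filas 0 = ((0 : Nat) : Int) by omega, PySem.List.slice_to_natCast]
    simp [h0]
  · have hk : numero_filas = ((numero_filas.toNat : Nat) : Int) := by omega
    have hle : numero_filas.toNat ≤ matriz.length := by
      unfold Pre_recortar_matriz_por_filas at hpre; omega
    have := rmpf_fold_inv matriz [] numero_filas.toNat
    simp only [List.length_nil, Nat.zero_add, List.map_nil, List.nil_append, Nat.cast_zero] at this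
    rw [show max numero_filas 0 = ((numero_filas.toNat : Nat) : Int) by omega,
      PySem.List.slice_to_natCast]
    conv_lhs => rw [hk]
    simp only [Int.toNat_natCast]
    rw [this]
    simp [Nat.sub_eq_zero_of_le hle]
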